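-- pv_equiv track=rewrite | github.com/xingyaner/Agentless | agentless/util/postprocess_data.py | map_to_physical_path
-- ===== SOURCE A (Python) =====
-- def map_to_physical_path(llm_path: str, physical_paths: list) -> str:
--     """
--     【路径物理对齐工具】
--     1. 精确匹配
--     2. 后缀匹配
--     """
--     clean_p = llm_path.strip().strip("'\"`").replace('\\', '/')
--
--     # 策略 1: 精确匹配
--     if clean_p in physical_paths:
--         return clean_p
--
--     # 策略 2: 后缀匹配 (如 build.sh -> oss-fuzz/projects/hiredis/build.sh)
--     for pp in physical_paths:
--         if pp.endswith(clean_p):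
--             return pp
--
--     return None
-- ===== SOURCE B (Python) =====
-- def map_to_physical_path(llm_path: str, physical_paths: list) -> str:
--     # Single pass: track an exact-match flag and the first suffix match together.
--     clean_p = llm_path.strip().strip("'\"`").replace('\\', '/')
--     exact = False
--     suffix = None
--     for pp in physical_paths:
--         if pp == clean_p:
--             exact = True
--         if suffix is None and pp.endswith(clean_p):
--             suffix = pp
--     return clean_p if exact else suffix
-- ===== Notes on version B (the rewrite author's own statement) =====
-- stated objective: alternative
-- what changed: Replaces the membership test plus a separate suffix-scan loop by a single traversal that maintains an exact-match flag and the first suffix candidate, deciding after the loop.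
import Mathlib
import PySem

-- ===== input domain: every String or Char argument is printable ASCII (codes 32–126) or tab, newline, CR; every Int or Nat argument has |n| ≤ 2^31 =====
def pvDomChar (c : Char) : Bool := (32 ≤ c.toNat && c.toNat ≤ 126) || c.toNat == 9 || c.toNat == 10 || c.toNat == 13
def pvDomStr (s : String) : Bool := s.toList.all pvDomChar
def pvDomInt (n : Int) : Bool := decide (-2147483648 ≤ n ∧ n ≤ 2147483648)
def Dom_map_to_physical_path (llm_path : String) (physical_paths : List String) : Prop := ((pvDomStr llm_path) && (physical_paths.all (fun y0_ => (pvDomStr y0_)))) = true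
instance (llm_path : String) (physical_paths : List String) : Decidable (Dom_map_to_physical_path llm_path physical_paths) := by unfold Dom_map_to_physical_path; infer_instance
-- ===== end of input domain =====

-- B merges A's membership test and separate suffix loop into one traversal keeping an exact flag and the first suffix candidate (alternative decomposition, same cost).


-- ===== PORT A =====
-- helper: A's second loop — first element ending with clean_p
def pvFindSuffix (clean : String) : List String → Option String
  | [] => none
  | pp :: rest => if PySem.Str.endswith pp clean then some pp else pvFindSuffix clean rest

def map_to_physical_path (llm_path : String) (physical_paths : List String) : Option String :=
  let clean_p := PySem.Str.replace (PySem.Str.stripChars (PySem.Str.strip llm_path) "'\"`") "\\" "/"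
  if clean_p ∈ physical_paths then some clean_p
  else pvFindSuffix clean_p physical_paths

-- ===== PORT B =====
def map_to_physical_path_alt (llm_path : String) (physical_paths : List String) : Option String :=
  let clean_p := PySem.Str.replace (PySem.Str.stripChars (PySem.Str.strip llm_path) "'\"`") "\\" "/"
  let st := physical_paths.foldl
    (fun (st : Bool × Option String) pp =>
      (st.1 || (pp == clean_p),
       if st.2.isNone && PySem.Str.endswith pp clean_p then some pp else st.2))
    (false, none)
  if st.1 then some clean_p else st.2

-- ===== PRECONDITION & SPEC =====
def Spec_map_to_physical_path (llm_path : String) (physical_paths : List String) (out : Option String) : Prop := out = map_to_physical_path_alt llm_path physical_paths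
instance (llm_path : String) (physical_paths : List String) (out : Option String) : Decidable (Spec_map_to_physical_path llm_path physical_paths out) := by unfold Spec_map_to_physical_path; infer_instance

-- ===== CLAIM (what is proved, stated in full; the proofs are below) =====
def Claim_equal_map_to_physical_path : Prop := ∀ (llm_path : String) (physical_paths : List String), Dom_map_to_physical_path llm_path physical_paths → Spec_map_to_physical_path llm_path physical_paths (map_to_physical_path llm_path physical_paths)


-- ===== LEMMAS AND PROOFS =====
theorem pvFold_char (c : String) (ps : List String) (e : Bool) (s : Option String) :
    ps.foldl
      (fun (st : Bool × Option String) pp =>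
        (st.1 || (pp == c),
         if st.2.isNone && PySem.Str.endswith pp c then some pp else st.2))
      (e, s)
    = (e || decide (c ∈ ps), s.elim (pvFindSuffix c ps) some) := by
  induction ps generalizing e s with
  | nil => cases s <;> simp [pvFindSuffix]
  | cons pp rest ih =>
    have hb : (pp == c) = decide (c = pp) := by
      by_cases h : pp = c
      · subst h; simp
      · have h' : ¬ c = pp := fun hc => h hc.symm
        simp [h, h']
    simp only [List.foldl_cons, ih]
    cases s with
    | some x => simp [hb, Bool.or_assoc]
    | none =>
      by_cases h2 : PySem.Chars.endswith pp.toList c.toList = true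
      · simp [pvFindSuffix, PySem.Str.endswith, h2, hb, Bool.or_assoc]
      · simp [pvFindSuffix, PySem.Str.endswith, h2, hb, Bool.or_assoc]

-- ===== VERDICT (by name: the statement is the Claim_ definition above) =====
theorem map_to_physical_path_spec : Claim_equal_map_to_physical_path := by
  intro llm_path physical_paths _
  unfold Spec_map_to_physical_path map_to_physical_path map_to_physical_path_alt
  simp only [pvFold_char, Bool.false_or, Option.elim]
  by_cases h : PySem.Str.replace (PySem.Str.stripChars (PySem.Str.strip llm_path) "'\"`") "\\" "/"
      ∈ physical_paths
  · simp [h]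
  · simp [h]
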